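-- pv_equiv track=rewrite | github.com/xsericon/vizop-latest | vizop_misc.py | HighestCategoryAmong
-- ===== SOURCE A (Python) =====
-- def HighestCategoryAmong(AllCategories=[], AscendingOrder=True, QueryCategories=[]):
-- 	# find the item in QueryCategories (list of CategoryNameItem instances) that has the min/max index in AllCategories
-- 	# (list of CategoryNameItem instances).
-- 	# AscendingOrder (bool) indicates whether the categories in AllCategories are ordered from low to high.
-- 	# If True, searches for max index; else searches for min index
-- 	# Any item in QueryCategories that isn't in AllCategories is ignored.
-- 	# If QueryCategories contains no items in AllCategories or is empty, returns None.
-- 	assert isinstance(AllCategories, list)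
-- 	assert isinstance(AscendingOrder, bool)
-- 	assert isinstance(QueryCategories, list)
-- 	QueriesInAllCategories = [c for c in QueryCategories if c in AllCategories]
-- 	if QueriesInAllCategories: # any matching categories found?
-- 		return AllCategories[(max if AscendingOrder else min)([AllCategories.index(c) for c in QueriesInAllCategories])]
-- 	else: return None
-- ===== SOURCE B (Python) =====
-- def HighestCategoryAmong(AllCategories=[], AscendingOrder=True, QueryCategories=[]):
-- 	# One forward pass over AllCategories; a 'seen' set keeps only first occurrences,
-- 	# matching list.index() semantics. Faster: no per-query membership scan / .index() calls.
-- 	query = set(QueryCategories)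
-- 	if not AscendingOrder:
-- 		for c in AllCategories:
-- 			if c in query:
-- 				return c
-- 		return None
-- 	seen = set()
-- 	best = None
-- 	for c in AllCategories:
-- 		if c not in seen:
-- 			seen.add(c)
-- 			if c in query:
-- 				best = c
-- 	return best
-- ===== Notes on version B (the rewrite author's own statement) =====
-- stated objective: faster
-- what changed: Replaces A's filter (a membership scan per query) plus per-query .index() calls and a max/min reduction over the index list by a single forward pass over AllCategories with a query set and a 'seen' set (first-occurrence semantics), returning early in the descending case.
import Mathlib
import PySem

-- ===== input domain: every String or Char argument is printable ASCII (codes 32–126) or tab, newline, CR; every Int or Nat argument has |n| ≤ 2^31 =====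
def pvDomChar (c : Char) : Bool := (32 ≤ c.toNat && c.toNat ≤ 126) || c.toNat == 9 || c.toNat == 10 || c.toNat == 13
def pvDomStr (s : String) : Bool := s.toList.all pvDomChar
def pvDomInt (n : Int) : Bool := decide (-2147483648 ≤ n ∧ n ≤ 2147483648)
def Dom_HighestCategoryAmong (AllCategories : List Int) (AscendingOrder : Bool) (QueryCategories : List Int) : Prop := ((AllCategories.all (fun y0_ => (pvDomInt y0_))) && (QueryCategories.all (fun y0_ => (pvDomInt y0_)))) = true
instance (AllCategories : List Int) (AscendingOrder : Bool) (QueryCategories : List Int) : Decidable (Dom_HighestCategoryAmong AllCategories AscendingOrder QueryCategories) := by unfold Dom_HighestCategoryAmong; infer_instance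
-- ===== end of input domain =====

-- B replaces A's filter + per-query .index() + max/min reduction by ONE forward pass over
-- AllCategories with a 'seen' set (first-occurrence semantics); one linear pass instead of per-query scans.

-- ===== PORT A =====
def HighestCategoryAmong (AllCategories : List Int) (AscendingOrder : Bool) (QueryCategories : List Int) : Option Int :=
  let QueriesInAllCategories := QueryCategories.filter (fun c => decide (c ∈ AllCategories))
  if QueriesInAllCategories = [] then none
  else
    let idxs : List Int :=
      QueriesInAllCategories.map (fun c => (((PySem.List.index? AllCategories c).getD 0 : Nat) : Int))
    some (PySem.List.pyGetD AllCategories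
      ((if AscendingOrder then PySem.List.max? idxs (fun x => x)
        else PySem.List.min? idxs (fun x => x)).getD 0) 0)

-- ===== PORT B =====
-- B, descending branch: return the first element of the list that is in the query set.
def pvDescLoop (query : PySem.Set Int) : List Int → Option Int
  | [] => none
  | c :: t => if PySem.Set.contains query c then some c else pvDescLoop query t

-- B, ascending branch: keep the latest first-occurrence element that is in the query set.
def pvAscLoop (query : PySem.Set Int) : List Int → PySem.Set Int → Option Int → Option Int
  | [], _, best => best
  | c :: t, seen, best =>
    if PySem.Set.contains seen c then pvAscLoop query t seen best
    else pvAscLoop query t (PySem.Set.add seen c)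
      (if PySem.Set.contains query c then some c else best)

def HighestCategoryAmong_alt (AllCategories : List Int) (AscendingOrder : Bool) (QueryCategories : List Int) : Option Int :=
  let query := PySem.Set.ofList QueryCategories
  if !AscendingOrder then pvDescLoop query AllCategories
  else pvAscLoop query AllCategories PySem.Set.empty none

-- ===== PRECONDITION & SPEC =====
def Spec_HighestCategoryAmong (AllCategories : List Int) (AscendingOrder : Bool) (QueryCategories : List Int) (out : Option Int) : Prop := out = HighestCategoryAmong_alt AllCategories AscendingOrder QueryCategories
instance (AllCategories : List Int) (AscendingOrder : Bool) (QueryCategories : List Int) (out : Option Int) : Decidable (Spec_HighestCategoryAmong AllCategories AscendingOrder QueryCategories out) := by unfold Spec_HighestCategoryAmong; infer_instance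

-- ===== CLAIM (what is proved, stated in full; the proofs are below) =====
def Claim_equal_HighestCategoryAmong : Prop := ∀ (AllCategories : List Int) (AscendingOrder : Bool) (QueryCategories : List Int), Dom_HighestCategoryAmong AllCategories AscendingOrder QueryCategories → Spec_HighestCategoryAmong AllCategories AscendingOrder QueryCategories (HighestCategoryAmong AllCategories AscendingOrder QueryCategories)

-- ===== LEMMAS AND PROOFS =====

-- Recursive descriptions of A's two branches (Q shrinks in the ascending one).
def pvG : List Int → List Int → Option Int
  | [], _ => none
  | a :: t, Q => if a ∈ Q then some a else pvG t Q

def pvH : List Int → List Int → Option Int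
  | [], _ => none
  | a :: t, Q => if a ∈ Q then (pvH t (Q.filter (fun c => decide (c ≠ a)))).or (some a)
                 else pvH t Q

-- Shorthands for the pieces of A's expression.
def pvQs (All Q : List Int) : List Int := Q.filter (fun c => decide (c ∈ All))
def pvF (All : List Int) (c : Int) : Int := (((PySem.List.index? All c).getD 0 : Nat) : Int)
def pvIdxs (All Q : List Int) : List Int := (pvQs All Q).map (pvF All)

theorem pvA_eq (All : List Int) (asc : Bool) (Q : List Int) :
    HighestCategoryAmong All asc Q =
      if pvQs All Q = [] then none
      else some (PySem.List.pyGetD All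
        ((if asc then PySem.List.max? (pvIdxs All Q) (fun x => x)
          else PySem.List.min? (pvIdxs All Q) (fun x => x)).getD 0) 0) := rfl

theorem pvA_eq_true (All Q : List Int) :
    HighestCategoryAmong All true Q =
      if pvQs All Q = [] then none
      else some (PySem.List.pyGetD All
        ((PySem.List.max? (pvIdxs All Q) (fun x => x)).getD 0) 0) := by
  rw [pvA_eq]; simp

theorem pvA_eq_false (All Q : List Int) :
    HighestCategoryAmong All false Q =
      if pvQs All Q = [] then none
      else some (PySem.List.pyGetD All
        ((PySem.List.min? (pvIdxs All Q) (fun x => x)).getD 0) 0) := by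
  rw [pvA_eq]; simp

theorem pvMemQs {All Q : List Int} {c : Int} : c ∈ pvQs All Q ↔ c ∈ Q ∧ c ∈ All := by
  simp [pvQs, List.mem_filter]

theorem pvF_cons_self (a : Int) (l : List Int) : pvF (a :: l) a = 0 := by
  unfold pvF
  rw [PySem.List.index?_cons_self]
  simp

theorem pvF_cons_ne {a c : Int} {l : List Int} (h : c ≠ a) (hc : c ∈ l) :
    pvF (a :: l) c = pvF l c + 1 := by
  obtain ⟨k, hk⟩ := Option.isSome_iff_exists.mp ((PySem.List.index?_isSome_iff l c).mpr hc)
  unfold pvF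
  rw [PySem.List.index?_cons_of_ne l (Ne.symm h), hk]
  simp

theorem pvF_natCast (All : List Int) (c : Int) : ∃ k : Nat, pvF All c = (k : Int) :=
  ⟨(PySem.List.index? All c).getD 0, rfl⟩

theorem pvIdx_nonneg {All Q : List Int} {x : Int} (hx : x ∈ pvIdxs All Q) : 0 ≤ x := by
  obtain ⟨c, _, rfl⟩ := List.mem_map.mp hx
  obtain ⟨k, hk⟩ := pvF_natCast All c
  rw [hk]; exact Int.natCast_nonneg k

-- max/min over Int with identity key is determined by its characteristic properties.
theorem pvMaxUnique (xs : List Int) (m : Int) (hmem : m ∈ xs) (hub : ∀ x ∈ xs, x ≤ m) :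
    PySem.List.max? xs (fun x => x) = some m := by
  cases hx : PySem.List.max? xs (fun x => x) with
  | none =>
      rw [PySem.List.max?_eq_none_iff] at hx
      simp [hx] at hmem
  | some M =>
      have hM := PySem.List.max?_mem hx
      have h2 := PySem.List.max?_isMax hx
      exact congrArg some (le_antisymm (hub M hM) (h2 m hmem))

theorem pvMinUnique (xs : List Int) (m : Int) (hmem : m ∈ xs) (hlb : ∀ x ∈ xs, m ≤ x) :
    PySem.List.min? xs (fun x => x) = some m := by
  cases hx : PySem.List.min? xs (fun x => x) with
  | none =>
      rw [PySem.List.min?_eq_none_iff] at hx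
      simp [hx] at hmem
  | some M =>
      have hM := PySem.List.min?_mem hx
      have h2 := PySem.List.min?_isMin hx
      exact congrArg some (le_antisymm (h2 m hmem) (hlb M hM))

theorem pvShiftMax (xs : List Int) :
    PySem.List.max? (xs.map (· + 1)) (fun x => x) = (PySem.List.max? xs (fun x => x)).map (· + 1) := by
  cases hx : PySem.List.max? xs (fun x => x) with
  | none =>
      rw [PySem.List.max?_eq_none_iff] at hx
      subst hx
      simp [PySem.List.max?_eq_none_iff]
  | some m =>
      have h2 := PySem.List.max?_isMax hx
      refine (pvMaxUnique _ (m + 1) (List.mem_map.mpr ⟨m, PySem.List.max?_mem hx, rfl⟩) ?_).trans rfl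
      intro x hxm
      obtain ⟨y, hy, rfl⟩ := List.mem_map.mp hxm
      have := h2 y hy
      omega

theorem pvShiftMin (xs : List Int) :
    PySem.List.min? (xs.map (· + 1)) (fun x => x) = (PySem.List.min? xs (fun x => x)).map (· + 1) := by
  cases hx : PySem.List.min? xs (fun x => x) with
  | none =>
      rw [PySem.List.min?_eq_none_iff] at hx
      subst hx
      simp [PySem.List.min?_eq_none_iff]
  | some m =>
      have h2 := PySem.List.min?_isMin hx
      refine (pvMinUnique _ (m + 1) (List.mem_map.mpr ⟨m, PySem.List.min?_mem hx, rfl⟩) ?_).trans rfl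
      intro x hxm
      obtain ⟨y, hy, rfl⟩ := List.mem_map.mp hxm
      have := h2 y hy
      omega

theorem pvQs_cons_notMem {a : Int} {Q : List Int} (l : List Int) (ha : a ∉ Q) :
    pvQs (a :: l) Q = pvQs l Q := by
  apply List.filter_congr
  intro c hc
  have : c ≠ a := fun h => ha (h ▸ hc)
  simp [List.mem_cons, this]

theorem pvIdxs_cons_notMem {a : Int} {Q : List Int} (l : List Int) (ha : a ∉ Q) :
    pvIdxs (a :: l) Q = (pvIdxs l Q).map (· + 1) := by
  rw [pvIdxs, pvQs_cons_notMem l ha, pvIdxs, List.map_map]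
  apply List.map_congr_left
  intro c hc
  obtain ⟨hcQ, hcl⟩ := pvMemQs.mp hc
  exact pvF_cons_ne (fun h => ha (h ▸ hcQ)) hcl

theorem pvGetD_step (a : Int) (l : List Int) (k : Nat) :
    PySem.List.pyGetD (a :: l) ((k : Int) + 1) 0 = PySem.List.pyGetD l (k : Int) 0 := by
  rw [show ((k : Int) + 1) = ((k + 1 : Nat) : Int) by push_cast; ring]
  rw [PySem.List.pyGetD_natCast, PySem.List.pyGetD_natCast, List.getD_cons_succ]

theorem pvA_desc (l Q : List Int) : HighestCategoryAmong l false Q = pvG l Q := by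
  induction l with
  | nil => rw [pvA_eq_false]; simp [pvQs, pvG]
  | cons a l ih =>
      by_cases ha : a ∈ Q
      · have haq : a ∈ pvQs (a :: l) Q := pvMemQs.mpr ⟨ha, List.mem_cons_self⟩
        have h0 : (0 : Int) ∈ pvIdxs (a :: l) Q :=
          List.mem_map.mpr ⟨a, haq, pvF_cons_self a l⟩
        have hmin := pvMinUnique _ 0 h0 (fun x hx => pvIdx_nonneg hx)
        rw [pvA_eq_false, if_neg (List.ne_nil_of_mem haq), hmin]
        simp only [Option.getD_some]
        rw [PySem.List.pyGetD_zero_cons]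
        simp [pvG, ha]
      · rw [pvA_eq_false, pvQs_cons_notMem l ha]
        rw [show pvG (a :: l) Q = pvG l Q by simp [pvG, ha], ← ih, pvA_eq_false]
        by_cases hqs : pvQs l Q = []
        · rw [if_pos hqs, if_pos hqs]
        · rw [if_neg hqs, if_neg hqs]
          cases hm : PySem.List.min? (pvIdxs l Q) (fun x => x) with
          | none =>
              rw [PySem.List.min?_eq_none_iff, pvIdxs, List.map_eq_nil_iff] at hm
              exact absurd hm hqs
          | some m =>
              obtain ⟨c, hc, hfc⟩ := List.mem_map.mp (PySem.List.min?_mem hm)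
              obtain ⟨k, hk⟩ := pvF_natCast l c
              have hmk : m = (k : Int) := by rw [← hfc, hk]
              subst hmk
              rw [pvIdxs_cons_notMem l ha, pvShiftMin, hm]
              simp only [Option.map_some, Option.getD_some]
              rw [pvGetD_step]

theorem pvA_asc (l Q : List Int) : HighestCategoryAmong l true Q = pvH l Q := by
  induction l generalizing Q with
  | nil => rw [pvA_eq_true]; simp [pvQs, pvH]
  | cons a l ih =>
      by_cases ha : a ∈ Q
      · have haq : a ∈ pvQs (a :: l) Q := pvMemQs.mpr ⟨ha, List.mem_cons_self⟩
        have h0 : (0 : Int) ∈ pvIdxs (a :: l) Q :=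
          List.mem_map.mpr ⟨a, haq, pvF_cons_self a l⟩
        have hH : pvH (a :: l) Q
            = (pvH l (Q.filter (fun c => decide (c ≠ a)))).or (some a) := by
          simp [pvH, ha]
        set Q' := Q.filter (fun c => decide (c ≠ a)) with hQ'
        have hmemQ' : ∀ {c : Int}, c ∈ Q' ↔ c ∈ Q ∧ c ≠ a := by
          intro c; simp [hQ', List.mem_filter]
        have hsplit : ∀ {c : Int}, c ∈ pvQs (a :: l) Q → c ≠ a → c ∈ pvQs l Q' := by
          intro c hc hca
          obtain ⟨h1, h2⟩ := pvMemQs.mp hc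
          have hcl : c ∈ l := by
            rcases List.mem_cons.mp h2 with h | h
            · exact absurd h hca
            · exact h
          exact pvMemQs.mpr ⟨hmemQ'.mpr ⟨h1, hca⟩, hcl⟩
        by_cases hqs' : pvQs l Q' = []
        · have hall : ∀ x ∈ pvIdxs (a :: l) Q, x = 0 := by
            intro x hx
            obtain ⟨c, hc, rfl⟩ := List.mem_map.mp hx
            by_cases hca : c = a
            · rw [hca]; exact pvF_cons_self a l
            · exact absurd (hqs' ▸ hsplit hc hca) (List.not_mem_nil)
          have hmax := pvMaxUnique _ 0 h0 (fun x hx => le_of_eq (hall x hx))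
          rw [pvA_eq_true, if_neg (List.ne_nil_of_mem haq), hmax]
          simp only [Option.getD_some]
          rw [PySem.List.pyGetD_zero_cons, hH, ← ih, pvA_eq_true, if_pos hqs']
          rfl
        · rw [pvA_eq_true, if_neg (List.ne_nil_of_mem haq)]
          rw [hH, ← ih, pvA_eq_true, if_neg hqs']
          cases hm : PySem.List.max? (pvIdxs l Q') (fun x => x) with
          | none =>
              rw [PySem.List.max?_eq_none_iff, pvIdxs, List.map_eq_nil_iff] at hm
              exact absurd hm hqs'
          | some m =>
              have hub := PySem.List.max?_isMax hm
              obtain ⟨c, hc, hfc⟩ := List.mem_map.mp (PySem.List.max?_mem hm)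
              obtain ⟨k, hk⟩ := pvF_natCast l c
              have hm0 : 0 ≤ m := pvIdx_nonneg (PySem.List.max?_mem hm)
              have hmem1 : m + 1 ∈ pvIdxs (a :: l) Q := by
                obtain ⟨hcQ', hcl⟩ := pvMemQs.mp hc
                obtain ⟨hcQ, hca⟩ := hmemQ'.mp hcQ'
                refine List.mem_map.mpr ⟨c, pvMemQs.mpr ⟨hcQ, List.mem_cons_of_mem a hcl⟩, ?_⟩
                rw [pvF_cons_ne hca hcl, hfc]
              have hub1 : ∀ x ∈ pvIdxs (a :: l) Q, x ≤ m + 1 := by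
                intro x hx
                obtain ⟨d, hd, rfl⟩ := List.mem_map.mp hx
                by_cases hda : d = a
                · rw [hda, pvF_cons_self a l]; omega
                · have hd' := hsplit hd hda
                  have hdl : d ∈ l := (pvMemQs.mp hd').2
                  rw [pvF_cons_ne hda hdl]
                  have := hub (pvF l d) (List.mem_map.mpr ⟨d, hd', rfl⟩)
                  omega
              rw [pvMaxUnique _ (m + 1) hmem1 hub1]
              have hmk : m = (k : Int) := by rw [← hfc, hk]
              subst hmk
              simp only [Option.getD_some, Option.some_or]
              rw [pvGetD_step]
      · rw [pvA_eq_true, pvQs_cons_notMem l ha]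
        rw [show pvH (a :: l) Q = pvH l Q by simp [pvH, ha], ← ih, pvA_eq_true]
        by_cases hqs : pvQs l Q = []
        · rw [if_pos hqs, if_pos hqs]
        · rw [if_neg hqs, if_neg hqs]
          cases hm : PySem.List.max? (pvIdxs l Q) (fun x => x) with
          | none =>
              rw [PySem.List.max?_eq_none_iff, pvIdxs, List.map_eq_nil_iff] at hm
              exact absurd hm hqs
          | some m =>
              obtain ⟨c, hc, hfc⟩ := List.mem_map.mp (PySem.List.max?_mem hm)
              obtain ⟨k, hk⟩ := pvF_natCast l c
              have hmk : m = (k : Int) := by rw [← hfc, hk]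
              subst hmk
              rw [pvIdxs_cons_notMem l ha, pvShiftMax, hm]
              simp only [Option.map_some, Option.getD_some]
              rw [pvGetD_step]

theorem pvContains (s : PySem.Set Int) (x : Int) :
    PySem.Set.contains s x = decide (x ∈ s) := by
  by_cases h : x ∈ s
  · simp [h]
  · simp only [h, decide_false]
    exact Bool.eq_false_iff.mpr (fun hh => h ((PySem.Set.contains_iff s x).mp hh))

theorem pvB_desc (l Q : List Int) : pvDescLoop (PySem.Set.ofList Q) l = pvG l Q := by
  induction l with
  | nil => rfl
  | cons a t ih =>
      by_cases ha : a ∈ Q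
      · simp [pvDescLoop, pvG, ha, PySem.Set.mem_ofList]
      · simp [pvDescLoop, pvG, ha, PySem.Set.mem_ofList, ih]

theorem pvB_asc (l Q : List Int) (seen : PySem.Set Int) (best : Option Int) :
    pvAscLoop (PySem.Set.ofList Q) l seen best
      = (pvH l (Q.filter (fun c => !(PySem.Set.contains seen c)))).or best := by
  induction l generalizing seen best with
  | nil => simp [pvAscLoop, pvH]
  | cons c t ih =>
      have eH : ∀ (Qs : List Int), pvH (c :: t) Qs
          = if c ∈ Qs then (pvH t (Qs.filter (fun x => decide (x ≠ c)))).or (some c)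
            else pvH t Qs := fun Qs => by simp only [pvH]
      have eL : ∀ (sn : PySem.Set Int) (b : Option Int),
          pvAscLoop (PySem.Set.ofList Q) (c :: t) sn b
            = if PySem.Set.contains sn c then pvAscLoop (PySem.Set.ofList Q) t sn b
              else pvAscLoop (PySem.Set.ofList Q) t (PySem.Set.add sn c)
                (if PySem.Set.contains (PySem.Set.ofList Q) c then some c else b) :=
        fun sn b => by simp only [pvAscLoop]
      by_cases hc : c ∈ seen
      · have hnot : c ∉ Q.filter (fun x => !(PySem.Set.contains seen x)) := by
          intro h
          have h2 := (List.mem_filter.mp h).2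
          rw [pvContains] at h2
          simp [hc] at h2
        rw [eL, if_pos (by rw [pvContains]; simp [hc]), ih, eH, if_neg hnot]
      · have hfilt : Q.filter (fun x => !(PySem.Set.contains (PySem.Set.add seen c) x))
            = (Q.filter (fun x => !(PySem.Set.contains seen x))).filter
                (fun x => decide (x ≠ c)) := by
          rw [List.filter_filter]
          apply List.filter_congr
          intro x hx
          rw [pvContains, pvContains]
          by_cases hxc : x = c
          · subst hxc; simp [PySem.Set.mem_add]
          · by_cases hxs : x ∈ seen <;> simp [hxs, hxc, PySem.Set.mem_add]
        have hcfalse : ¬(PySem.Set.contains seen c = true) := by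
          rw [pvContains]; simp [hc]
        by_cases hq : c ∈ Q
        · have hcin : c ∈ Q.filter (fun x => !(PySem.Set.contains seen x)) := by
            refine List.mem_filter.mpr ⟨hq, ?_⟩
            rw [pvContains]; simp [hc]
          rw [eL, if_neg hcfalse,
            if_pos (by rw [pvContains]; simp [PySem.Set.mem_ofList, hq]),
            ih, hfilt, eH, if_pos hcin, Option.or_assoc, Option.some_or]
        · have hnotin : c ∉ Q.filter (fun x => !(PySem.Set.contains seen x)) := by
            intro h; exact hq (List.mem_filter.mp h).1
          have hsame : (Q.filter (fun x => !(PySem.Set.contains seen x))).filter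
              (fun x => decide (x ≠ c)) = Q.filter (fun x => !(PySem.Set.contains seen x)) := by
            apply List.filter_eq_self.mpr
            intro x hx
            have hxQ : x ∈ Q := (List.mem_filter.mp hx).1
            simp only [decide_eq_true_eq]
            exact fun h => hq (h ▸ hxQ)
          rw [eL, if_neg hcfalse,
            if_neg (by rw [pvContains]; simp [PySem.Set.mem_ofList, hq]),
            ih, hfilt, hsame, eH, if_neg hnotin]

-- ===== VERDICT (by name: the statement is the Claim_ definition above) =====
theorem HighestCategoryAmong_spec : Claim_equal_HighestCategoryAmong := by
  intro All asc Q _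
  unfold Spec_HighestCategoryAmong HighestCategoryAmong_alt
  cases asc with
  | false => simp [pvB_desc, pvA_desc]
  | true =>
      have hQ : Q.filter (fun c => !(PySem.Set.contains PySem.Set.empty c)) = Q := by
        apply List.filter_eq_self.mpr
        intro x hx
        simp [PySem.Set.contains, PySem.Set.empty]
      rw [Bool.not_true, if_neg (by simp), pvB_asc, hQ, Option.or_none, pvA_asc]
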